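-- pv_equiv track=rewrite | github.com/robencr8/Robin_AI | pipeline/lead_scorer.py | _score_company
-- ===== SOURCE A (Python) =====
-- COMPANY_TYPE_SCORES: dict[str, int] = {
--     "mall":          18,
--     "hotel":         18,
--     "resort":        18,
--     "hospital":      16,
--     "airport":       16,
--     "municipality":  15,
--     "authority":     15,
--     "hypermarket":   14,
--     "supermarket":   14,
--     "industrial":    13,
--     "factory":       13,
--     "restaurant":    10,
--     "food":          10,
--     "school":         8,
--     "residential":    6,
--     "office":         5,
-- }
--
-- def _score_company(company: str) -> int:
--     if not company:
--         return 5
--     text = company.lower()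
--     best = 5
--     for key, score in COMPANY_TYPE_SCORES.items():
--         if key in text:
--             best = max(best, score)
--     return best
-- ===== SOURCE B (Python) =====
-- def _score_company(company: str) -> int:
--     # Decision chain over score tiers, checked from highest to lowest:
--     # the first tier containing a matching keyword decides the score.
--     if not company:
--         return 5
--     t = company.lower()
--     if "mall" in t or "hotel" in t or "resort" in t:
--         return 18
--     if "hospital" in t or "airport" in t:
--         return 16
--     if "municipality" in t or "authority" in t:
--         return 15
--     if "hypermarket" in t or "supermarket" in t:
--         return 14
--     if "industrial" in t or "factory" in t:
--         return 13
--     if "restaurant" in t or "food" in t: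
--         return 10
--     if "school" in t:
--         return 8
--     if "residential" in t:
--         return 6
--     return 5
-- ===== Notes on version B (the rewrite author's own statement) =====
-- stated objective: alternative
-- what changed: Replaces the dict scan with a running max by an explicit if-chain of score tiers checked from highest to lowest, returning the first tier with a keyword match (the 'office' tier coincides with the default 5 and is folded into it).
import Mathlib
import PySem

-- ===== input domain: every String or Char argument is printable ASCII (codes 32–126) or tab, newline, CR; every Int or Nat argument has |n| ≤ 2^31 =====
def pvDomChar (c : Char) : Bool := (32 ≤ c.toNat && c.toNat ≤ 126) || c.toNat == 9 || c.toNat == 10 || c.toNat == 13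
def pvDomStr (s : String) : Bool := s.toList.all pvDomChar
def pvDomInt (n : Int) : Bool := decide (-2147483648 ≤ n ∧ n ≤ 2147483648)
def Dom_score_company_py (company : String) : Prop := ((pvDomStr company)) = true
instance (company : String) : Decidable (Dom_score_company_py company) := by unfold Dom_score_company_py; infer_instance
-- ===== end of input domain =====

-- B replaces the dict scan with a running max by an explicit tier if-chain
-- checked from highest score to lowest (objective: alternative decomposition).

-- ===== PORT A =====
-- COMPANY_TYPE_SCORES as an association list in insertion order
def companyTypeScores : List (String × Int) :=
  [("mall", 18), ("hotel", 18), ("resort", 18), ("hospital", 16), ("airport", 16),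
   ("municipality", 15), ("authority", 15), ("hypermarket", 14), ("supermarket", 14),
   ("industrial", 13), ("factory", 13), ("restaurant", 10), ("food", 10),
   ("school", 8), ("residential", 6), ("office", 5)]

def score_company_py (company : String) : Int :=
  if company = "" then 5
  else
    let text := PySem.Str.lower company
    companyTypeScores.foldl
      (fun best p => if PySem.Str.isIn p.1 text then max best p.2 else best) 5

-- ===== PORT B =====
-- the if/elif tier chain of Source B, transliterated branch for branch
def score_company_py_alt (company : String) : Int :=
  if company = "" then 5
  else
    let t := PySem.Str.lower company
    if PySem.Str.isIn "mall" t || (PySem.Str.isIn "hotel" t || PySem.Str.isIn "resort" t) then 18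
    else if PySem.Str.isIn "hospital" t || PySem.Str.isIn "airport" t then 16
    else if PySem.Str.isIn "municipality" t || PySem.Str.isIn "authority" t then 15
    else if PySem.Str.isIn "hypermarket" t || PySem.Str.isIn "supermarket" t then 14
    else if PySem.Str.isIn "industrial" t || PySem.Str.isIn "factory" t then 13
    else if PySem.Str.isIn "restaurant" t || PySem.Str.isIn "food" t then 10
    else if PySem.Str.isIn "school" t then 8
    else if PySem.Str.isIn "residential" t then 6
    else 5

-- ===== PRECONDITION & SPEC =====
def Spec_score_company_py (company : String) (out : Int) : Prop := out = score_company_py_alt company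
instance (company : String) (out : Int) : Decidable (Spec_score_company_py company out) := by unfold Spec_score_company_py; infer_instance

-- ===== CLAIM (what is proved, stated in full; the proofs are below) =====
def Claim_equal_score_company_py : Prop := ∀ (company : String), Dom_score_company_py company → Spec_score_company_py company (score_company_py company)

-- ===== LEMMAS AND PROOFS =====

-- A's loop body as a named step function (definitionally the lambda in the port)
def scoreStep (text : String) : Int → String × Int → Int :=
  fun best p => if PySem.Str.isIn p.1 text then max best p.2 else best

-- A's table, regrouped by score tier (highest first)
def tierList : List (Int × List String) :=
  [(18, ["mall", "hotel", "resort"]), (16, ["hospital", "airport"]),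
   (15, ["municipality", "authority"]), (14, ["hypermarket", "supermarket"]),
   (13, ["industrial", "factory"]), (10, ["restaurant", "food"]),
   (8, ["school"]), (6, ["residential"]), (5, ["office"])]

def flatTiers (ts : List (Int × List String)) : List (String × Int) :=
  ts.flatMap (fun t => t.2.map (fun k => (k, t.1)))

theorem flat_eq : flatTiers tierList = companyTypeScores := by rfl

-- the first-match chain over a tier list, defaulting to 5
def chainScore (text : String) : List (Int × List String) → Int
  | [] => 5
  | t :: rest =>
      if t.2.any (fun k => PySem.Str.isIn k text) then t.1 else chainScore text rest

-- a running-max fold whose remaining scores are all ≤ the accumulator stays put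
theorem foldl_absorb (text : String) (l : List (String × Int)) (b : Int)
    (h : ∀ q ∈ l, q.2 ≤ b) : l.foldl (scoreStep text) b = b := by
  induction l with
  | nil => rfl
  | cons p l ih =>
    simp only [List.foldl_cons, scoreStep]
    have hp : p.2 ≤ b := h p (by simp)
    have hb : (if PySem.Str.isIn p.1 text then max b p.2 else b) = b := by
      split <;> omega
    rw [hb]
    exact ih (fun q hq => h q (by simp [hq]))

-- a same-score segment of A's scan: the fold over it is 'max b s' iff some key matches
theorem foldl_seg (text : String) (keys : List String) (s b : Int) :
    (keys.map (fun k => (k, s))).foldl (scoreStep text) b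
      = if keys.any (fun k => PySem.Str.isIn k text) then max b s else b := by
  induction keys generalizing b with
  | nil => simp
  | cons k ks ih =>
    simp only [List.map_cons, List.foldl_cons, List.any_cons]
    rw [show scoreStep text b (k, s) = if PySem.Str.isIn k text then max b s else b from rfl, ih]
    by_cases h : PySem.Str.isIn k text = true
    · rw [if_pos h]
      have ht : (PySem.Str.isIn k text || ks.any fun k => PySem.Str.isIn k text) = true := by
        rw [h, Bool.true_or]
      rw [if_pos ht]
      split <;> omega
    · have hf : PySem.Str.isIn k text = false := Bool.eq_false_iff.mpr h
      simp only [hf, Bool.false_or, Bool.false_eq_true, if_false]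

-- on a score-descending tier list with scores ≥ 5, A's running max from 5
-- is the first matching tier's score
theorem fold_flat_eq_chain (text : String) (ts : List (Int × List String))
    (hsort : ts.Pairwise (fun a b => b.1 ≤ a.1)) (h5 : ∀ t ∈ ts, (5:Int) ≤ t.1) :
    (flatTiers ts).foldl (scoreStep text) 5 = chainScore text ts := by
  induction ts with
  | nil => rfl
  | cons t rest ih =>
    rcases List.pairwise_cons.mp hsort with ⟨hhead, htail⟩
    have hflat : flatTiers (t :: rest)
        = t.2.map (fun k => (k, t.1)) ++ flatTiers rest := by
      simp [flatTiers]
    rw [hflat, List.foldl_append, foldl_seg]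
    simp only [chainScore]
    by_cases c : (t.2.any fun k => PySem.Str.isIn k text) = true
    · rw [if_pos c, if_pos c]
      have h1 : (5:Int) ≤ t.1 := h5 t (by simp)
      have hmax : max 5 t.1 = t.1 := by omega
      rw [hmax]
      refine foldl_absorb text _ _ ?_
      intro q hq
      rcases List.mem_flatMap.mp hq with ⟨r, hr, hqr⟩
      rcases List.mem_map.mp hqr with ⟨k, _, hk⟩
      have : r.1 ≤ t.1 := hhead r hr
      rw [← hk]
      exact this
    · rw [if_neg c, if_neg c]
      exact ih htail (fun r hr => h5 r (by simp [hr]))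

-- ===== VERDICT (by name: the statement is the Claim_ definition above) =====
theorem score_company_py_spec : Claim_equal_score_company_py := by
  intro company _
  unfold Spec_score_company_py score_company_py score_company_py_alt
  by_cases hc : company = ""
  · simp [hc]
  · simp only [hc, if_false]
    set text := PySem.Str.lower company with htext
    show companyTypeScores.foldl (scoreStep text) 5 = _
    rw [← flat_eq, fold_flat_eq_chain text tierList (by decide) (by decide)]
    simp only [tierList, chainScore, List.any_cons, List.any_nil, Bool.or_false]
    split_ifs <;> rfl
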